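-- pv_equiv track=rewrite | github.com/tarunala99/ReinforcementLearning | problems.py | ql_policy
-- ===== SOURCE A (Python) =====
-- def ql_policy(q):
--     l=[]
--     for t in q:
--     	maxi=-10000000000000000000000000000000
--     	tran=0
--     	count=0
--     	for s in t:
--     		if(s>maxi):
--     			maxi=s
--     			tran=count
--     		count=count+1
--     	l.append(tran)
--     return l
-- ===== SOURCE B (Python) =====
-- def ql_policy(q):
--     res = []
--     for t in q:
--         order = sorted(range(len(t)), key=lambda i: -t[i])
--         res.append(order[0] if order else 0)
--     return res
-- ===== Notes on version B (the rewrite author's own statement) =====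
-- stated objective: alternative
-- what changed: Replaces A's running-max/running-argmax accumulator loop with a sort-based algorithm: each row's index list is stably sorted by descending value and the first index of the sorted order is taken (stability makes ties resolve to the first occurrence, matching A); empty rows keep A's value 0.
import Mathlib
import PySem

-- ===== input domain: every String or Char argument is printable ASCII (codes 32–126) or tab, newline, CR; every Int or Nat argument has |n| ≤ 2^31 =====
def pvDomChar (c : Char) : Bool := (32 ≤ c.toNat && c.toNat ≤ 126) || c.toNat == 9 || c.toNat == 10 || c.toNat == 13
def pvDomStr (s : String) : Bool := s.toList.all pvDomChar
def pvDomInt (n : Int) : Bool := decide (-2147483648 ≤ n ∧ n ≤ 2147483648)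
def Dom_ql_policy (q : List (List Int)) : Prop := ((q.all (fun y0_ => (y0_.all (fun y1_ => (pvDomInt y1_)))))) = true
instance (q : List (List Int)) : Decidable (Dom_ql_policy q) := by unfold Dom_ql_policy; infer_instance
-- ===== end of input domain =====

-- B replaces A's running-max/running-argmax accumulator loop by a sort-based algorithm: stably sort each row's indices by descending value and take the first (same result, different algorithm; not faster).


-- ===== PORT A =====
-- inner loop state: (maxi, tran, count)
def qlRowA (t : List Int) : Int × Int × Int :=
  t.foldl (fun st s =>
      if s > st.1 then (s, st.2.2, st.2.2 + 1) else (st.1, st.2.1, st.2.2 + 1))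
    (-10000000000000000000000000000000, 0, 0)

def ql_policy (q : List (List Int)) : List Int :=
  q.foldl (fun l t => l ++ [(qlRowA t).2.1]) []

-- ===== PORT B =====
-- order = sorted(range(len(t)), key=lambda i: -t[i]); res.append(order[0] if order else 0)
def qlRowB (t : List Int) : Int :=
  (PySem.List.sorted (PySem.List.pyRange 0 (t.length : Int) 1)
      (fun i => -(PySem.List.pyGetD t i 0))).headD 0

def ql_policy_alt (q : List (List Int)) : List Int :=
  q.foldl (fun res t => res ++ [qlRowB t]) []

-- ===== PRECONDITION & SPEC =====
def Spec_ql_policy (q : List (List Int)) (out : List Int) : Prop := out = ql_policy_alt q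
instance (q : List (List Int)) (out : List Int) : Decidable (Spec_ql_policy q out) := by unfold Spec_ql_policy; infer_instance

-- ===== CLAIM (what is proved, stated in full; the proofs are below) =====
def Claim_equal_ql_policy : Prop := ∀ (q : List (List Int)), Dom_ql_policy q → Spec_ql_policy q (ql_policy q)

-- ===== LEMMAS AND PROOFS =====

theorem insertBy_ne_nil {α : Type} (p : α → α → Bool) (x : α) (l : List α) :
    PySem.List.insertBy p x l ≠ [] := by
  cases l with
  | nil => simp [PySem.List.insertBy]
  | cons y ys =>
    simp only [PySem.List.insertBy]
    split <;> simp

theorem headD_insertBy {α : Type} (key : α → Int) (x : α) (l : List α) (d : α) (h : l ≠ []) :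
    (PySem.List.insertBy (fun a b => decide (key a < key b)) x l).headD d
      = if key x < key (l.headD d) then x else l.headD d := by
  cases l with
  | nil => exact absurd rfl h
  | cons y ys =>
    by_cases h1 : key x < key y
    · simp [PySem.List.insertBy, h1]
    · simp [PySem.List.insertBy, h1]

-- head of the insertion-sort accumulator = running first strict minimum of the keys
theorem headD_foldl_insertBy {α : Type} (key : α → Int) (xs : List α) (l : List α) (d : α)
    (h : l ≠ []) :
    (xs.foldl (fun acc x => PySem.List.insertBy (fun a b => decide (key a < key b)) x acc) l).headD d
      = xs.foldl (fun m x => if key x < key m then x else m) (l.headD d) := by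
  induction xs generalizing l with
  | nil => rfl
  | cons x xs ih =>
    simp only [List.foldl_cons]
    rw [ih _ (insertBy_ne_nil _ _ _), headD_insertBy key x l d h]

-- A's inner loop from position c (state value = t[jz]) equals B's index fold over range(c, len(t))
theorem inner_eq (t : List Int) (k : Nat) : ∀ (c : Nat) (jz : Int),
    t.length - c = k → c ≤ t.length →
    ((t.drop c).foldl (fun st s =>
        if s > st.1 then (s, st.2.2, st.2.2 + 1) else (st.1, st.2.1, st.2.2 + 1))
      (PySem.List.pyGetD t jz 0, jz, (c : Int))).2.1
    = (PySem.List.pyRange (c : Int) (t.length : Int) 1).foldl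
        (fun m i => if -(PySem.List.pyGetD t i 0) < -(PySem.List.pyGetD t m 0) then i else m) jz := by
  induction k with
  | zero =>
    intro c jz hk hc
    have hce : c = t.length := by omega
    subst hce
    rw [List.drop_length, PySem.List.pyRange_one_eq_nil (by omega)]
    rfl
  | succ k ih =>
    intro c jz hk hc
    have hlt : c < t.length := by omega
    rw [List.drop_eq_getElem_cons hlt,
        PySem.List.pyRange_one_cons (by exact_mod_cast hlt)]
    simp only [List.foldl_cons]
    have hgc : PySem.List.pyGetD t (c : Int) 0 = t[c] := by
      simp [PySem.List.pyGetD_natCast, hlt]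
    by_cases hb : PySem.List.pyGetD t jz 0 < t[c]
    · rw [if_pos (show t[c] > PySem.List.pyGetD t jz 0 from hb),
          if_pos (show -(PySem.List.pyGetD t (c : Int) 0) < -(PySem.List.pyGetD t jz 0) by
            rw [hgc]; omega)]
      rw [← hgc]
      have := ih (c + 1) (c : Int) (by omega) (by omega)
      push_cast at this ⊢
      exact this
    · rw [if_neg (show ¬ t[c] > PySem.List.pyGetD t jz 0 from hb),
          if_neg (show ¬ -(PySem.List.pyGetD t (c : Int) 0) < -(PySem.List.pyGetD t jz 0) by
            rw [hgc]; omega)]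
      have := ih (c + 1) jz (by omega) (by omega)
      push_cast at this ⊢
      exact this

-- per-row equality (needs the Dom bound to fire A's first update past the sentinel)
theorem qlRow_eq (t : List Int) (hb : ∀ x ∈ t, -2147483648 ≤ x) :
    (qlRowA t).2.1 = qlRowB t := by
  cases t with
  | nil => rfl
  | cons a s =>
    have ha : -2147483648 ≤ a := hb a List.mem_cons_self
    have hstep : a > (-10000000000000000000000000000000 : Int) := by omega
    -- B side: peel index 0 off the sorted fold
    have hlen : (0 : Int) < ((a :: s).length : Int) := by
      simp only [List.length_cons]; push_cast; omega
    unfold qlRowB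
    rw [PySem.List.sorted_eq_foldl_insertBy,
        PySem.List.pyRange_one_cons hlen, List.foldl_cons]
    have h1 : PySem.List.insertBy
        (fun x y => decide (-(PySem.List.pyGetD (a :: s) x 0) < -(PySem.List.pyGetD (a :: s) y 0)))
        (0 : Int) ([] : List Int) = [(0 : Int)] := by
      simp [PySem.List.insertBy]
    rw [h1, headD_foldl_insertBy _ _ _ _ (by simp), List.headD_cons]
    -- A side: first iteration fires
    unfold qlRowA
    rw [List.foldl_cons, if_pos hstep]
    have h0 : PySem.List.pyGetD (a :: s) (0 : Int) 0 = a := PySem.List.pyGetD_zero_cons a s 0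
    have := inner_eq (a :: s) s.length 1 0 (by simp) (by simp)
    rw [h0, List.drop_one, List.tail_cons] at this
    simpa using this

theorem ql_foldl_appA (q : List (List Int)) :
    ql_policy q = q.map (fun t => (qlRowA t).2.1) := by
  unfold ql_policy
  rw [PySem.List.foldl_append_singleton_eq_map]
  simp

theorem ql_foldl_appB (q : List (List Int)) :
    ql_policy_alt q = q.map qlRowB := by
  unfold ql_policy_alt
  rw [PySem.List.foldl_append_singleton_eq_map]
  simp

-- ===== VERDICT (by name: the statement is the Claim_ definition above) =====
theorem ql_policy_spec : Claim_equal_ql_policy := by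
  intro q hdom
  unfold Spec_ql_policy
  rw [ql_foldl_appA, ql_foldl_appB]
  apply List.map_congr_left
  intro t ht
  apply qlRow_eq
  intro x hx
  simp only [Dom_ql_policy, List.all_eq_true, pvDomInt, decide_eq_true_eq] at hdom
  exact (hdom t ht x hx).1
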